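-- pv_equiv track=rewrite | github.com/thisaldil/SENSORY-LEARNING-COMPANION | server/app/services/nlp/adaptive_text_engine.py | _compute_keyword_preservation
-- ===== SOURCE A (Python) =====
-- from typing import List, Tuple, Dict, Optional
--
-- def _compute_keyword_preservation(
--     original_keywords: List[str], transmuted_text: str
-- ) -> Tuple[List[str], List[str]]:
--     """Phase 4 – keyword preservation check.
--
--     For multi-word keywords (bigrams), checks if ALL component words appear
--     individually — they rarely survive verbatim after rewriting.
--     """
--     if not original_keywords:
--         return [], []
--     lower_out = transmuted_text.lower()
--     kept: List[str] = []
--     dropped: List[str] = []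
--     for kw in original_keywords:
--         token = kw.lower().strip()
--         if not token:
--             continue
--         parts = token.split()
--         # Bigrams: preserved if every component word appears somewhere in output
--         if len(parts) > 1:
--             preserved = all(part in lower_out for part in parts)
--         else:
--             preserved = token in lower_out
--         if preserved:
--             kept.append(kw)
--         else:
--             dropped.append(kw)
--     return kept, dropped
-- ===== SOURCE B (Python) =====
-- from typing import List, Tuple
--
--
-- def _compute_keyword_preservation(
--     original_keywords: List[str], transmuted_text: str
-- ) -> Tuple[List[str], List[str]]:
--     """Keyword preservation check via a substring-window index.
--
--     The text is indexed ONCE: for every distinct word length needed, the set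
--     of all substrings (windows) of that exact length is collected.  A keyword
--     survives iff every whitespace-split word of its normalized form is one of
--     those windows (for a single-word keyword that is exactly the substring
--     test), so each word becomes one set lookup instead of a text scan.
--     """
--     lower_out = transmuted_text.lower()
--     tagged = []   # (original keyword, its normalized component words)
--     lengths = []  # distinct word lengths, first-seen order
--     for kw in original_keywords:
--         token = kw.lower().strip()
--         if token:
--             words = token.split()
--             tagged.append((kw, words))
--             for w in words:
--                 if len(w) not in lengths:
--                     lengths.append(len(w))
--     n = len(lower_out)
--     windows = set()
--     for L in lengths:
--         for i in range(n - L + 1):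
--             windows.add(lower_out[i:i + L])
--     kept, dropped = [], []
--     for kw, words in tagged:
--         if all(w in windows for w in words):
--             kept.append(kw)
--         else:
--             dropped.append(kw)
--     return kept, dropped
-- ===== Notes on version B (the rewrite author's own statement) =====
-- stated objective: faster
-- what changed: B builds a substring index of the text once (the set of all windows of each distinct needed word length) and partitions keywords by expected-O(1) set lookups, instead of A's per-keyword substring scans of the text.
import Mathlib
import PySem

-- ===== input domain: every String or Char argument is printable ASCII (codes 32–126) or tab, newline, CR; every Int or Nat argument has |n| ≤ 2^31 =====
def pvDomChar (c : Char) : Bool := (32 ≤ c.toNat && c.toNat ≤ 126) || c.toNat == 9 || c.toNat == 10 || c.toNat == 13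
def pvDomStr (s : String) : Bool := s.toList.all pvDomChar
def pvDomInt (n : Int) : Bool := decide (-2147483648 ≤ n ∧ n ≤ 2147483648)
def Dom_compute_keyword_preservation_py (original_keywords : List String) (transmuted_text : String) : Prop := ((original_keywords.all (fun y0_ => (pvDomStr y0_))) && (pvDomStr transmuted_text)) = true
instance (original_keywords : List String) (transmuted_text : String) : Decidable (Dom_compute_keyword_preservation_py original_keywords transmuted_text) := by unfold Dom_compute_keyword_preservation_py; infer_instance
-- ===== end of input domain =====

-- B indexes the text once into a set of substring windows of the needed word lengths and
-- partitions keywords by set lookups instead of per-keyword text scans; objective: faster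
-- (measured faster in a timing run).

-- ===== PORT A =====
-- literal transliteration of A: early return on [], one loop appending to kept/dropped,
-- with the bigram/unigram branch on len(parts) > 1.
def compute_keyword_preservation_py (original_keywords : List String) (transmuted_text : String) : List String × List String :=
  if original_keywords = [] then ([], [])
  else
    let lower_out := PySem.Str.lower transmuted_text
    original_keywords.foldl (fun st kw =>
      let token := PySem.Str.strip (PySem.Str.lower kw)
      if token = "" then st
      else
        let parts := PySem.Str.split₀ token
        let preserved :=
          if parts.length > 1 then parts.all (fun part => PySem.Str.isIn part lower_out)
          else PySem.Str.isIn token lower_out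
        if preserved then (st.1 ++ [kw], st.2) else (st.1, st.2 ++ [kw]))
      ([], [])

-- ===== PORT B =====
-- B's first loop body: tag a keyword with its normalized words, record new word lengths.
def pvAddLen (ls : List Int) (w : String) : List Int :=
  if PySem.Str.len w ∈ ls then ls else ls ++ [(PySem.Str.len w : Int)]

def pvCollect (st : List (String × List String) × List Int) (kw : String) :
    List (String × List String) × List Int :=
  let token := PySem.Str.strip (PySem.Str.lower kw)
  if token = "" then st
  else
    let words := PySem.Str.split₀ token
    (st.1 ++ [(kw, words)], words.foldl pvAddLen st.2)

-- B's index-building inner loop: add every window of length L of lower_out to the set.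
def pvAddWindows (lower_out : String) (n : Int) (s : PySem.Set String) (L : Int) : PySem.Set String :=
  (PySem.List.pyRange 0 (n - L + 1) 1).foldl
    (fun s i => PySem.Set.add s (PySem.Str.slice lower_out (some i) (some (i + L)))) s

-- B's final loop body: route a tagged keyword by set lookups of its words.
def pvRoute (windows : PySem.Set String) (st : List String × List String)
    (p : String × List String) : List String × List String :=
  if p.2.all (fun w => PySem.Set.contains windows w) then (st.1 ++ [p.1], st.2)
  else (st.1, st.2 ++ [p.1])

def compute_keyword_preservation_py_alt (original_keywords : List String) (transmuted_text : String) : List String × List String :=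
  let lower_out := PySem.Str.lower transmuted_text
  let td := original_keywords.foldl pvCollect ([], [])
  let n : Int := PySem.Str.len lower_out
  let windows := td.2.foldl (pvAddWindows lower_out n) PySem.Set.empty
  td.1.foldl (pvRoute windows) ([], [])

-- ===== PRECONDITION & SPEC =====
def Spec_compute_keyword_preservation_py (original_keywords : List String) (transmuted_text : String) (out : List String × List String) : Prop := out = compute_keyword_preservation_py_alt original_keywords transmuted_text
instance (original_keywords : List String) (transmuted_text : String) (out : List String × List String) : Decidable (Spec_compute_keyword_preservation_py original_keywords transmuted_text out) := by unfold Spec_compute_keyword_preservation_py; infer_instance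

-- ===== CLAIM (what is proved, stated in full; the proofs are below) =====
def Claim_equal_compute_keyword_preservation_py : Prop := ∀ (original_keywords : List String) (transmuted_text : String), Dom_compute_keyword_preservation_py original_keywords transmuted_text → Spec_compute_keyword_preservation_py original_keywords transmuted_text (compute_keyword_preservation_py original_keywords transmuted_text)

-- ===== LEMMAS AND PROOFS =====

-- ---- A-side: split₀/strip facts showing A's branched check is the uniform "all words occur" ----

-- split₀.go with a non-empty accumulator prepends the reversed accumulator.
theorem pv_go_acc (s : List Char) : ∀ cur acc,
    PySem.Chars.split₀.go s cur acc = acc.reverse ++ PySem.Chars.split₀.go s cur [] := by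
  induction s with
  | nil => intro cur acc; simp [PySem.Chars.split₀.go]; split <;> simp
  | cons c rest ih =>
      intro cur acc
      simp only [PySem.Chars.split₀.go]
      split
      · split
        · exact ih [] acc
        · rw [ih [] (cur.reverse :: acc), ih [] [cur.reverse]]; simp
      · exact ih (c :: cur) acc

-- a run with no whitespace yields exactly one piece.
theorem pv_go_nows (s : List Char) : ∀ cur, (∀ c ∈ s, PySem.Chars.isspace c = false) →
    cur ≠ [] ∨ s ≠ [] →
    PySem.Chars.split₀.go s cur [] = [cur.reverse ++ s] := by
  induction s with
  | nil =>
      intro cur _ h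
      simp only [PySem.Chars.split₀.go]
      rcases h with h | h
      · simp [List.isEmpty_iff, h]
      · simp at h
  | cons c rest ih =>
      intro cur hns _
      have hc : PySem.Chars.isspace c = false := hns c (by simp)
      simp only [PySem.Chars.split₀.go, hc]
      rw [ih (c :: cur) (fun d hd => hns d (by simp [hd])) (Or.inl (by simp))]
      simp

-- the result is non-empty as soon as something non-whitespace has been seen.
theorem pv_go_ne_nil (s : List Char) : ∀ cur,
    (cur ≠ [] ∨ ∃ c ∈ s, PySem.Chars.isspace c = false) →
    PySem.Chars.split₀.go s cur [] ≠ [] := by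
  induction s with
  | nil =>
      intro cur h
      rcases h with h | h
      · simp [PySem.Chars.split₀.go, List.isEmpty_iff, h]
      · simp at h
  | cons c rest ih =>
      intro cur h
      simp only [PySem.Chars.split₀.go]
      by_cases hc : PySem.Chars.isspace c = true
      · simp only [hc, if_true]
        by_cases hcur : cur = []
        · simp only [hcur, List.isEmpty_nil, if_true]
          apply ih
          rcases h with h | ⟨d, hd, hdw⟩
          · exact absurd hcur h
          · rcases List.mem_cons.mp hd with rfl | hd
            · rw [hc] at hdw; cases hdw
            · exact Or.inr ⟨d, hd, hdw⟩
        · simp only [List.isEmpty_iff, hcur, if_false]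
          rw [pv_go_acc]
          simp
      · simp only [hc]
        exact ih (c :: cur) (Or.inl (by simp))

-- a token that ends in a non-whitespace character but contains whitespace splits
-- into at least two pieces.
theorem pv_go_two (s : List Char) : ∀ cur,
    (∃ c ∈ s, PySem.Chars.isspace c = true) →
    (∀ c, s.getLast? = some c → PySem.Chars.isspace c = false) →
    cur ≠ [] →
    2 ≤ (PySem.Chars.split₀.go s cur []).length := by
  induction s with
  | nil => intro cur h _ _; simp at h
  | cons c rest ih =>
      intro cur hws hlast hcur
      have hrest_ne : rest ≠ [] := by
        rintro rfl
        obtain ⟨d, hd, hdw⟩ := hws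
        simp only [List.mem_singleton] at hd
        subst hd
        have h2 := hlast d (by simp)
        rw [h2] at hdw; cases hdw
      have hlast' : ∀ d, rest.getLast? = some d → PySem.Chars.isspace d = false := by
        intro d hd
        exact hlast d (by rw [List.getLast?_cons, hd]; simp)
      simp only [PySem.Chars.split₀.go]
      by_cases hc : PySem.Chars.isspace c = true
      · simp only [hc, if_true, List.isEmpty_iff, hcur, if_false]
        rw [pv_go_acc]
        have hne : PySem.Chars.split₀.go rest [] [] ≠ [] := by
          apply pv_go_ne_nil
          right
          refine ⟨rest.getLast hrest_ne, List.getLast_mem hrest_ne, ?_⟩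
          exact hlast' _ (List.getLast?_eq_some_getLast hrest_ne)
        have hpos := List.length_pos_of_ne_nil hne
        simp only [List.reverse_cons, List.reverse_nil, List.nil_append, List.length_append,
          List.length_cons, List.length_nil]
        omega
      · simp only [hc]
        apply ih (c :: cur)
        · obtain ⟨d, hd, hdw⟩ := hws
          rcases List.mem_cons.mp hd with rfl | hd
          · rw [hdw] at hc; exact absurd rfl hc
          · exact ⟨d, hd, hdw⟩
        · exact hlast'
        · simp

-- strip leaves no whitespace at either end.
theorem pv_head_dropWhile (p : Char → Bool) (l : List Char) (c : Char)
    (h : (l.dropWhile p).head? = some c) : p c = false := by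
  induction l with
  | nil => simp at h
  | cons a t ih =>
      rw [List.dropWhile_cons] at h
      split at h
      · exact ih h
      · simp at h; subst h; simp_all

theorem pv_strip_last (s : List Char) (c : Char)
    (h : (PySem.Chars.strip s).getLast? = some c) : PySem.Chars.isspace c = false := by
  unfold PySem.Chars.strip PySem.Chars.rstrip at h
  rw [← List.head?_reverse, List.reverse_reverse] at h
  exact pv_head_dropWhile _ _ _ h

theorem pv_strip_head (s : List Char) (c : Char)
    (h : (PySem.Chars.strip s).head? = some c) : PySem.Chars.isspace c = false := by
  unfold PySem.Chars.strip PySem.Chars.rstrip PySem.Chars.lstrip at h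
  set t := List.dropWhile PySem.Chars.isspace s with ht
  have hpre : (List.dropWhile PySem.Chars.isspace t.reverse).reverse <+: t := by
    rw [← List.reverse_reverse t]
    exact List.reverse_prefix.mpr (by rw [List.reverse_reverse]; exact List.dropWhile_suffix _)
  have hne : (List.dropWhile PySem.Chars.isspace t.reverse).reverse ≠ [] := by
    intro hnil; rw [hnil] at h; simp at h
  have : t.head? = some c := by
    obtain ⟨tail, heq⟩ := hpre
    rw [← heq, List.head?_append_of_ne_nil _ hne]
    exact h
  exact pv_head_dropWhile _ _ _ this

-- the key per-token fact: for a non-empty token with non-whitespace ends, A's branched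
-- check equals the uniform "all split words occur" check.
theorem pv_token_eq (t : List Char) (ht : t ≠ [])
    (hh : ∀ c, t.head? = some c → PySem.Chars.isspace c = false)
    (hl : ∀ c, t.getLast? = some c → PySem.Chars.isspace c = false)
    (P : List Char → Bool) :
    (if (PySem.Chars.split₀ t).length > 1 then (PySem.Chars.split₀ t).all P else P t)
      = (PySem.Chars.split₀ t).all P := by
  by_cases hws : ∃ c ∈ t, PySem.Chars.isspace c = true
  · have h2 : 2 ≤ (PySem.Chars.split₀ t).length := by
      obtain ⟨c, rest, rfl⟩ := List.exists_cons_of_ne_nil ht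
      have hc : PySem.Chars.isspace c = false := hh c rfl
      have hrest_ne : rest ≠ [] := by
        rintro rfl
        obtain ⟨d, hd, hdw⟩ := hws
        simp only [List.mem_singleton] at hd; subst hd
        rw [hc] at hdw; cases hdw
      unfold PySem.Chars.split₀
      simp only [PySem.Chars.split₀.go, hc, if_false, Bool.false_eq_true]
      apply pv_go_two
      · obtain ⟨d, hd, hdw⟩ := hws
        rcases List.mem_cons.mp hd with rfl | hd
        · rw [hdw] at hc; cases hc
        · exact ⟨d, hd, hdw⟩
      · intro d hd
        exact hl d (by rw [List.getLast?_cons, hd]; simp)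
      · simp
    rw [if_pos (by omega)]
  · push Not at hws
    have hsp : PySem.Chars.split₀ t = [t] := by
      unfold PySem.Chars.split₀
      have := pv_go_nows t [] (fun c hc => by simpa using hws c hc) (Or.inr ht)
      simpa using this
    rw [hsp]; simp

-- the same fact lifted to Strings, in exactly the shape A's loop body uses.
theorem pv_token_eq_str (token lower_out : String) (hne : token ≠ "")
    (hh : ∀ c, token.toList.head? = some c → PySem.Chars.isspace c = false)
    (hl : ∀ c, token.toList.getLast? = some c → PySem.Chars.isspace c = false) :
    (if (PySem.Str.split₀ token).length > 1
       then (PySem.Str.split₀ token).all (fun part => PySem.Str.isIn part lower_out)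
       else PySem.Str.isIn token lower_out)
    = (PySem.Str.split₀ token).all (fun word => PySem.Str.isIn word lower_out) := by
  have hlen : (PySem.Str.split₀ token).length = (PySem.Chars.split₀ token.toList).length := by
    rw [← PySem.Str.split₀_map_toList, List.length_map]
  have hall : (PySem.Str.split₀ token).all (fun word => PySem.Str.isIn word lower_out)
      = (PySem.Chars.split₀ token.toList).all (fun w => PySem.Chars.isIn w lower_out.toList) := by
    rw [← PySem.Str.split₀_map_toList, List.all_map]
    simp [Function.comp_def, PySem.Str.isIn_eq]
  have htl : token.toList ≠ [] := by
    intro h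
    exact hne (String.toList_inj.mp (by simpa using h))
  have key := pv_token_eq token.toList htl hh hl (fun w => PySem.Chars.isIn w lower_out.toList)
  rw [hlen, hall, PySem.Str.isIn_eq]
  exact key

-- ---- the tag list both sides produce (keyword, normalized component words) ----

def pvTag (kws : List String) : List (String × List String) :=
  ((kws.map (fun kw => (kw, PySem.Str.strip (PySem.Str.lower kw)))).filter
      (fun p => p.2 != "")).map (fun p => (p.1, PySem.Str.split₀ p.2))

theorem pvTag_cons (kw : String) (rest : List String) :
    pvTag (kw :: rest)
    = if PySem.Str.strip (PySem.Str.lower kw) = "" then pvTag rest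
      else (kw, PySem.Str.split₀ (PySem.Str.strip (PySem.Str.lower kw))) :: pvTag rest := by
  unfold pvTag
  rw [List.map_cons]
  by_cases h : PySem.Str.strip (PySem.Str.lower kw) = ""
  · rw [if_pos h, List.filter_cons_of_neg (by simp [h])]
  · rw [if_neg h, List.filter_cons_of_pos (by simp [bne_iff_ne, h]), List.map_cons]

theorem pvCollect_pos (st : List (String × List String) × List Int) (kw : String)
    (htok : PySem.Str.strip (PySem.Str.lower kw) = "") : pvCollect st kw = st := by
  unfold pvCollect
  rw [if_pos htok]

theorem pvCollect_neg (st : List (String × List String) × List Int) (kw : String)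
    (htok : ¬ PySem.Str.strip (PySem.Str.lower kw) = "") :
    pvCollect st kw
    = (st.1 ++ [(kw, PySem.Str.split₀ (PySem.Str.strip (PySem.Str.lower kw)))],
       (PySem.Str.split₀ (PySem.Str.strip (PySem.Str.lower kw))).foldl pvAddLen st.2) := by
  unfold pvCollect
  rw [if_neg htok]

theorem pvCollect_neg_fst (st : List (String × List String) × List Int) (kw : String)
    (htok : ¬ PySem.Str.strip (PySem.Str.lower kw) = "") :
    (pvCollect st kw).1 = st.1 ++ [(kw, PySem.Str.split₀ (PySem.Str.strip (PySem.Str.lower kw)))] := by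
  simp only [pvCollect_neg st kw htok]

theorem pvCollect_neg_snd (st : List (String × List String) × List Int) (kw : String)
    (htok : ¬ PySem.Str.strip (PySem.Str.lower kw) = "") :
    (pvCollect st kw).2
      = (PySem.Str.split₀ (PySem.Str.strip (PySem.Str.lower kw))).foldl pvAddLen st.2 := by
  simp only [pvCollect_neg st kw htok]

-- A's loop body, named for the proofs (definitionally the lambda in port A).
def pvStepA (lower_out : String) (st : List String × List String) (kw : String) :
    List String × List String :=
  let token := PySem.Str.strip (PySem.Str.lower kw)
  if token = "" then st
  else
    let parts := PySem.Str.split₀ token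
    let preserved :=
      if parts.length > 1 then parts.all (fun part => PySem.Str.isIn part lower_out)
      else PySem.Str.isIn token lower_out
    if preserved then (st.1 ++ [kw], st.2) else (st.1, st.2 ++ [kw])

-- A's survival flag in uniform form.
def pvFlagA (lower_out : String) (words : List String) : Bool :=
  words.all (fun w => PySem.Str.isIn w lower_out)

-- A's loop, run from any accumulators, appends the two projections of the tag list.
theorem pv_foldA (lower_out : String) (kws : List String) : ∀ k0 d0 : List String,
    kws.foldl (pvStepA lower_out) (k0, d0)
    = (k0 ++ ((pvTag kws).filter (fun p => pvFlagA lower_out p.2)).map (fun p => p.1),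
       d0 ++ ((pvTag kws).filter (fun p => !pvFlagA lower_out p.2)).map (fun p => p.1)) := by
  induction kws with
  | nil => intro k0 d0; simp [pvTag]
  | cons kw rest ih =>
      intro k0 d0
      rw [List.foldl_cons, pvTag_cons]
      by_cases htok : PySem.Str.strip (PySem.Str.lower kw) = ""
      · have hstep : pvStepA lower_out (k0, d0) kw = (k0, d0) := by
          simp [pvStepA, htok]
        rw [if_pos htok, hstep]
        exact ih k0 d0
      · have hh : ∀ c, (PySem.Str.strip (PySem.Str.lower kw)).toList.head? = some c →
            PySem.Chars.isspace c = false := by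
          intro c hc
          rw [PySem.Str.toList_strip] at hc
          exact pv_strip_head _ _ hc
        have hl : ∀ c, (PySem.Str.strip (PySem.Str.lower kw)).toList.getLast? = some c →
            PySem.Chars.isspace c = false := by
          intro c hc
          rw [PySem.Str.toList_strip] at hc
          exact pv_strip_last _ _ hc
        have hpres := pv_token_eq_str (PySem.Str.strip (PySem.Str.lower kw)) lower_out htok hh hl
        have hstep : pvStepA lower_out (k0, d0) kw
            = if pvFlagA lower_out (PySem.Str.split₀ (PySem.Str.strip (PySem.Str.lower kw)))
                then (k0 ++ [kw], d0) else (k0, d0 ++ [kw]) := by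
          unfold pvStepA pvFlagA
          simp only [if_neg htok, hpres]
        rw [if_neg htok, hstep]
        by_cases hs : pvFlagA lower_out (PySem.Str.split₀ (PySem.Str.strip (PySem.Str.lower kw)))
        · rw [if_pos hs, List.filter_cons_of_pos (by simpa using hs),
            List.filter_cons_of_neg (by simp [hs]), List.map_cons, ih (k0 ++ [kw]) d0]
          simp
        · have hs2 : pvFlagA lower_out (PySem.Str.split₀ (PySem.Str.strip (PySem.Str.lower kw))) = false := by
            simpa using hs
          rw [if_neg hs, List.filter_cons_of_neg (by simp [hs2]),
            List.filter_cons_of_pos (by simp [hs2]), List.map_cons, ih k0 (d0 ++ [kw])]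
          simp

-- ---- B-side: generic partition fold ----

theorem pv_foldB (F : String × List String → Bool) (tagged : List (String × List String))
    (windows : PySem.Set String)
    (hF : ∀ p ∈ tagged, (p.2.all (fun w => PySem.Set.contains windows w)) = F p) :
    ∀ k0 d0 : List String,
    tagged.foldl (pvRoute windows) (k0, d0)
    = (k0 ++ (tagged.filter F).map (fun p => p.1),
       d0 ++ (tagged.filter (fun p => !F p)).map (fun p => p.1)) := by
  induction tagged with
  | nil => intro k0 d0; simp
  | cons p rest ih =>
      intro k0 d0
      have hp : (p.2.all (fun w => PySem.Set.contains windows w)) = F p := hF p (by simp)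
      have hrest : ∀ q ∈ rest, (q.2.all (fun w => PySem.Set.contains windows w)) = F q :=
        fun q hq => hF q (by simp [hq])
      rw [List.foldl_cons]
      by_cases hs : F p = true
      · have hstep : pvRoute windows (k0, d0) p = (k0 ++ [p.1], d0) := by
          unfold pvRoute
          rw [hp, if_pos hs]
        rw [hstep, List.filter_cons_of_pos (by simp [hs]),
          List.filter_cons_of_neg (by simp [hs]), List.map_cons, ih hrest (k0 ++ [p.1]) d0]
        simp
      · have hs2 : F p = false := by simpa using hs
        have hstep : pvRoute windows (k0, d0) p = (k0, d0 ++ [p.1]) := by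
          unfold pvRoute
          rw [hp, hs2]
          simp
        rw [hstep, List.filter_cons_of_neg (by simp [hs2]),
          List.filter_cons_of_pos (by simp [hs2]), List.map_cons, ih hrest k0 (d0 ++ [p.1])]
        simp

-- ---- the collect fold: first component is pvTag; lengths cover all tagged words ----

theorem pv_collect_fst (kws : List String) : ∀ st,
    (kws.foldl pvCollect st).1 = st.1 ++ pvTag kws := by
  induction kws with
  | nil => intro st; simp [pvTag]
  | cons kw rest ih =>
      intro st
      rw [List.foldl_cons, ih, pvTag_cons]
      by_cases htok : PySem.Str.strip (PySem.Str.lower kw) = ""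
      · rw [if_pos htok]; simp only [pvCollect_pos st kw htok]
      · rw [if_neg htok]; simp only [pvCollect_neg st kw htok]
        simp

theorem pv_addLen_mono (words : List String) : ∀ ls L, L ∈ ls → L ∈ words.foldl pvAddLen ls := by
  induction words with
  | nil => intro ls L h; simpa using h
  | cons w ws ih =>
      intro ls L h
      rw [List.foldl_cons]
      apply ih
      unfold pvAddLen
      split
      · exact h
      · exact List.mem_append_left _ h

theorem pv_addLen_mem (words : List String) : ∀ ls, ∀ w ∈ words,
    PySem.Str.len w ∈ words.foldl pvAddLen ls := by
  induction words with
  | nil => intro ls w h; simp at h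
  | cons w2 ws ih =>
      intro ls w h
      rw [List.foldl_cons]
      rcases List.mem_cons.mp h with rfl | h
      · apply pv_addLen_mono
        unfold pvAddLen
        split
        · assumption
        · simp
      · exact ih _ w h

theorem pv_addLen_nonneg (words : List String) : ∀ ls, (∀ L ∈ ls, (0:Int) ≤ L) →
    ∀ L ∈ words.foldl pvAddLen ls, (0:Int) ≤ L := by
  induction words with
  | nil => intro ls h L hL; exact h L (by simpa using hL)
  | cons w ws ih =>
      intro ls h L hL
      rw [List.foldl_cons] at hL
      refine ih _ ?_ L hL
      intro L2 hL2
      unfold pvAddLen at hL2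
      split at hL2
      · exact h L2 hL2
      · rcases List.mem_append.mp hL2 with h1 | h1
        · exact h L2 h1
        · simp only [List.mem_singleton] at h1
          subst h1
          rw [PySem.Str.len_eq]
          positivity
theorem pv_collect_nonneg (kws : List String) : ∀ st, (∀ L ∈ st.2, (0:Int) ≤ L) →
    ∀ L ∈ (kws.foldl pvCollect st).2, (0:Int) ≤ L := by
  induction kws with
  | nil => intro st h L hL; exact h L (by simpa using hL)
  | cons kw rest ih =>
      intro st h L hL
      rw [List.foldl_cons] at hL
      refine ih _ ?_ L hL
      intro L2 hL2
      by_cases htok : PySem.Str.strip (PySem.Str.lower kw) = ""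
      · simp only [pvCollect_pos st kw htok] at hL2
        exact h L2 hL2
      · simp only [pvCollect_neg_snd st kw htok] at hL2
        exact pv_addLen_nonneg _ _ h L2 hL2

theorem pv_collect_closure (kws : List String) : ∀ st,
    (∀ p ∈ st.1, ∀ w ∈ p.2, PySem.Str.len w ∈ st.2) →
    ∀ p ∈ (kws.foldl pvCollect st).1, ∀ w ∈ p.2,
      PySem.Str.len w ∈ (kws.foldl pvCollect st).2 := by
  induction kws with
  | nil => intro st h p hp w hw; exact h p (by simpa using hp) w hw
  | cons kw rest ih =>
      intro st h p hp w hw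
      rw [List.foldl_cons] at hp ⊢
      refine ih _ ?_ p hp w hw
      intro q hq w2 hw2
      by_cases htok : PySem.Str.strip (PySem.Str.lower kw) = ""
      · simp only [pvCollect_pos st kw htok] at hq ⊢
        exact h q hq w2 hw2
      · simp only [pvCollect_neg_fst st kw htok] at hq
        simp only [pvCollect_neg_snd st kw htok]
        rcases List.mem_append.mp hq with h1 | h1
        · exact pv_addLen_mono _ _ _ (h q h1 w2 hw2)
        · simp only [List.mem_singleton] at h1
          subst h1
          exact pv_addLen_mem (PySem.Str.split₀ (PySem.Str.strip (PySem.Str.lower kw))) st.2 w2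
            (by simpa using hw2)

-- ---- the window index: membership characterization ----

theorem pv_mem_foldl {α β : Type} (step : List α → β → List α) (P : β → α → Prop)
    (hstep : ∀ s b x, x ∈ step s b ↔ x ∈ s ∨ P b x) :
    ∀ (l : List β) (s : List α) (x : α), x ∈ l.foldl step s ↔ x ∈ s ∨ ∃ b ∈ l, P b x := by
  intro l
  induction l with
  | nil => intro s x; simp
  | cons b l ih =>
      intro s x
      rw [List.foldl_cons, ih, hstep]
      simp only [List.mem_cons]
      constructor
      · rintro ((h | h) | ⟨c, hc, hP⟩)
        · exact Or.inl h
        · exact Or.inr ⟨b, Or.inl rfl, h⟩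
        · exact Or.inr ⟨c, Or.inr hc, hP⟩
      · rintro (h | ⟨c, (rfl | hc), hP⟩)
        · exact Or.inl (Or.inl h)
        · exact Or.inl (Or.inr hP)
        · exact Or.inr ⟨c, hc, hP⟩

theorem pv_mem_addWindows (lower_out : String) (n : Int) (s : PySem.Set String) (L : Int)
    (x : String) :
    x ∈ pvAddWindows lower_out n s L
    ↔ x ∈ s ∨ ∃ i ∈ PySem.List.pyRange 0 (n - L + 1) 1,
        x = PySem.Str.slice lower_out (some i) (some (i + L)) := by
  unfold pvAddWindows
  exact pv_mem_foldl
    (fun s i => PySem.Set.add s (PySem.Str.slice lower_out (some i) (some (i + L))))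
    (fun i x => x = PySem.Str.slice lower_out (some i) (some (i + L)))
    (fun s i x => PySem.Set.mem_add s _ x) _ s x

-- any window is an infix of the text; a word of recorded length occurs iff it is a window.
theorem pv_window_isIn (lower_out : String) (lengths : List Int)
    (hnn : ∀ L ∈ lengths, (0:Int) ≤ L) (w : String)
    (hw : PySem.Str.len w ∈ lengths) :
    (w ∈ lengths.foldl (pvAddWindows lower_out (PySem.Str.len lower_out)) PySem.Set.empty)
    ↔ PySem.Str.isIn w lower_out = true := by
  rw [pv_mem_foldl (pvAddWindows lower_out (PySem.Str.len lower_out))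
      (fun L x => ∃ i ∈ PySem.List.pyRange 0 (PySem.Str.len lower_out - L + 1),
        x = PySem.Str.slice lower_out (some i) (some (i + L)))
      (fun s L x => pv_mem_addWindows lower_out (PySem.Str.len lower_out) s L x)]
  constructor
  · rintro (hemp | ⟨L, hL, i, hi, rfl⟩)
    · exact absurd hemp (by simp [PySem.Set.empty])
    · rw [PySem.Str.isIn_iff_infix]
      obtain ⟨h0i, _⟩ := PySem.List.mem_pyRange_one.mp hi
      have h0L : (0:Int) ≤ L := hnn L hL
      rw [PySem.Str.toList_slice, PySem.Chars.slice_eq_listSlice,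
        PySem.List.slice_toNat _ h0i (by omega)]
      exact (List.take_prefix _ _).isInfix.trans (List.drop_suffix _ _).isInfix
  · intro hin
    obtain ⟨pre, suf, heq⟩ := (PySem.Str.isIn_iff_infix w lower_out).mp hin
    refine Or.inr ⟨PySem.Str.len w, hw, (pre.length : Int), ?_, ?_⟩
    · rw [PySem.List.mem_pyRange_one]
      have hlen : lower_out.toList.length = pre.length + w.toList.length + suf.length := by
        rw [← heq]; simp; omega
      rw [PySem.Str.len_eq, PySem.Str.len_eq]
      constructor
      · positivity
      · omega
    · rw [← String.toList_inj, PySem.Str.toList_slice, PySem.Chars.slice_eq_listSlice,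
        PySem.Str.len_eq, PySem.List.slice_natCast_add]
      rw [← heq, List.append_assoc, List.drop_left, List.take_left]

-- all with a pointwise-on-members equal predicate.
theorem pv_all_congr {α : Type} (l : List α) (f g : α → Bool)
    (h : ∀ x ∈ l, f x = g x) : l.all f = l.all g := by
  induction l with
  | nil => rfl
  | cons a t ih =>
      simp only [List.all_cons]
      rw [h a (by simp), ih (fun x hx => h x (by simp [hx]))]

-- ===== VERDICT (by name: the statement is the Claim_ definition above) =====
theorem compute_keyword_preservation_py_spec : Claim_equal_compute_keyword_preservation_py := by
  intro kws text _
  unfold Spec_compute_keyword_preservation_py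
  unfold compute_keyword_preservation_py compute_keyword_preservation_py_alt
  by_cases h : kws = []
  · subst h; rfl
  · rw [if_neg h]
    have hA := pv_foldA (PySem.Str.lower text) kws [] []
    have htag : (kws.foldl pvCollect ([], [])).1 = pvTag kws := by
      simpa using pv_collect_fst kws ([], [])
    have hnn : ∀ L ∈ (kws.foldl pvCollect ([], [])).2, (0:Int) ≤ L :=
      pv_collect_nonneg kws ([], []) (by simp)
    have hcl : ∀ p ∈ (kws.foldl pvCollect ([], [])).1, ∀ w ∈ p.2,
        PySem.Str.len w ∈ (kws.foldl pvCollect ([], [])).2 :=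
      pv_collect_closure kws ([], []) (by simp)
    have hF : ∀ p ∈ (kws.foldl pvCollect ([], [])).1,
        (p.2.all (fun w => PySem.Set.contains
          (((kws.foldl pvCollect ([], [])).2).foldl
            (pvAddWindows (PySem.Str.lower text) (PySem.Str.len (PySem.Str.lower text)))
            PySem.Set.empty) w))
        = pvFlagA (PySem.Str.lower text) p.2 := by
      intro p hp
      unfold pvFlagA
      refine pv_all_congr _ _ _ ?_
      intro w hw
      have hiff := pv_window_isIn (PySem.Str.lower text) (kws.foldl pvCollect ([], [])).2 hnn w
        (hcl p hp w hw)
      cases hval : PySem.Str.isIn w (PySem.Str.lower text) with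
      | true => exact (PySem.Set.contains_iff _ _).mpr (hiff.mpr hval)
      | false =>
          cases hc : PySem.Set.contains
              (((kws.foldl pvCollect ([], [])).2).foldl
                (pvAddWindows (PySem.Str.lower text) (PySem.Str.len (PySem.Str.lower text)))
                PySem.Set.empty) w with
          | false => rfl
          | true =>
              have hmem := hiff.mp ((PySem.Set.contains_iff _ _).mp hc)
              rw [hval] at hmem
              simp at hmem
    have hB := pv_foldB (fun p => pvFlagA (PySem.Str.lower text) p.2)
      (kws.foldl pvCollect ([], [])).1 _ hF [] []
    rw [← htag] at hA
    exact hA.trans hB.symm
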